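-- pv_equiv track=rewrite | github.com/SarveshT94/Sarvesh-MLM-Code | app/services/risk_service.py | get_risk_summary
-- ===== SOURCE A (Python) =====
-- def get_risk_summary(risk_data):
--     """
--     Returns aggregated counts for UI dashboard
--     """
--     summary = {
--         "high": 0,
--         "medium": 0,
--         "low": 0
--     }
--
--     for user in risk_data:
--         level = user.get("risk_level")
--
--         if level == "high":
--             summary["high"] += 1
--         elif level == "medium":
--             summary["medium"] += 1
--         else:
--             summary["low"] += 1
--
--     return summary
-- ===== SOURCE B (Python) =====
-- def get_risk_summary(risk_data):
--     data = list(risk_data)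
--     high = sum(1 for u in data if u.get("risk_level") == "high")
--     medium = sum(1 for u in data if u.get("risk_level") == "medium")
--     return {"high": high, "medium": medium, "low": len(data) - high - medium}
-- ===== Notes on version B (the rewrite author's own statement) =====
-- stated objective: simpler
-- what changed: Replaces the branching accumulator loop over a mutable dict with two independent counting passes (sum of matches for 'high' and 'medium') and derives the 'low' bucket arithmetically as len(data) - high - medium, reproducing the else-catch-all without a branch.
import Mathlib
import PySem

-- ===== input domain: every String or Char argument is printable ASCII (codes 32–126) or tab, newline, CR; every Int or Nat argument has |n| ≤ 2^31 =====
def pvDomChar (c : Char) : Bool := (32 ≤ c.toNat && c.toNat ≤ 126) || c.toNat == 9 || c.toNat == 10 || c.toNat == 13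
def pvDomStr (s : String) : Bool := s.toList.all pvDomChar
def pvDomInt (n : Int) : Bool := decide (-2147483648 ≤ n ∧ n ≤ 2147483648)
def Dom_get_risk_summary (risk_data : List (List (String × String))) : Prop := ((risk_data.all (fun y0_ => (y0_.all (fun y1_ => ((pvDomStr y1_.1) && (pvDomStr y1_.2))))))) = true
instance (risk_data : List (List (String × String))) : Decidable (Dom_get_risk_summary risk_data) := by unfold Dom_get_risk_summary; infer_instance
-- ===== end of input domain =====

-- B replaces the branching dict-accumulator loop by two counting passes, deriving the "low" bucket by subtraction (objective: simpler).

-- ===== PORT A =====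
-- A: mutable dict summary, one loop, branch per user incrementing the matching bucket.
def get_risk_summary (risk_data : List (List (String × String))) : List (String × Int) :=
  (risk_data.foldl
    (fun summary user =>
      let level := (PySem.Dict.mk user).get? "risk_level"
      if level = some "high" then summary.modify "high" 0 (· + 1)
      else if level = some "medium" then summary.modify "medium" 0 (· + 1)
      else summary.modify "low" 0 (· + 1))
    (PySem.Dict.mk [("high", (0 : Int)), ("medium", 0), ("low", 0)])).items

-- ===== PORT B =====
-- B: two independent counting passes; low = len - high - medium.
def get_risk_summary_alt (risk_data : List (List (String × String))) : List (String × Int) :=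
  let high : Int := (risk_data.countP (fun u => (PySem.Dict.mk u).get? "risk_level" == some "high") : Nat)
  let medium : Int := (risk_data.countP (fun u => (PySem.Dict.mk u).get? "risk_level" == some "medium") : Nat)
  [("high", high), ("medium", medium), ("low", (risk_data.length : Int) - high - medium)]

-- ===== PRECONDITION & SPEC =====
def Spec_get_risk_summary (risk_data : List (List (String × String))) (out : List (String × Int)) : Prop := out = get_risk_summary_alt risk_data
instance (risk_data : List (List (String × String))) (out : List (String × Int)) : Decidable (Spec_get_risk_summary risk_data out) := by unfold Spec_get_risk_summary; infer_instance

-- ===== CLAIM (what is proved, stated in full; the proofs are below) =====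
def Claim_equal_get_risk_summary : Prop := ∀ (risk_data : List (List (String × String))), Dom_get_risk_summary risk_data → Spec_get_risk_summary risk_data (get_risk_summary risk_data)

-- ===== LEMMAS AND PROOFS =====

-- Computing A's increment step on the literal three-bucket dict, one lemma per branch.
theorem pv_mod_high (a b c : Int) :
    (PySem.Dict.mk [("high", a), ("medium", b), ("low", c)]).modify "high" 0 (· + 1)
    = PySem.Dict.mk [("high", a + 1), ("medium", b), ("low", c)] := by
  apply PySem.Dict.ext
  simp [PySem.Dict.modify, PySem.Dict.insert, PySem.Dict.getD, PySem.Dict.get?, PySem.Dict.contains]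

theorem pv_mod_medium (a b c : Int) :
    (PySem.Dict.mk [("high", a), ("medium", b), ("low", c)]).modify "medium" 0 (· + 1)
    = PySem.Dict.mk [("high", a), ("medium", b + 1), ("low", c)] := by
  apply PySem.Dict.ext
  simp [PySem.Dict.modify, PySem.Dict.insert, PySem.Dict.getD, PySem.Dict.get?, PySem.Dict.contains]

theorem pv_mod_low (a b c : Int) :
    (PySem.Dict.mk [("high", a), ("medium", b), ("low", c)]).modify "low" 0 (· + 1)
    = PySem.Dict.mk [("high", a), ("medium", b), ("low", c + 1)] := by
  apply PySem.Dict.ext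
  simp [PySem.Dict.modify, PySem.Dict.insert, PySem.Dict.getD, PySem.Dict.get?, PySem.Dict.contains]

-- Invariant of A's loop, for arbitrary starting contents of the three buckets.
theorem get_risk_summary_loop (l : List (List (String × String))) (a b c : Int) :
    (l.foldl
      (fun summary user =>
        let level := (PySem.Dict.mk user).get? "risk_level"
        if level = some "high" then summary.modify "high" 0 (· + 1)
        else if level = some "medium" then summary.modify "medium" 0 (· + 1)
        else summary.modify "low" 0 (· + 1))
      (PySem.Dict.mk [("high", a), ("medium", b), ("low", c)])).items
    = [("high", a + (l.countP (fun u => (PySem.Dict.mk u).get? "risk_level" == some "high") : Nat)),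
       ("medium", b + (l.countP (fun u => (PySem.Dict.mk u).get? "risk_level" == some "medium") : Nat)),
       ("low", c + ((l.length : Int)
          - (l.countP (fun u => (PySem.Dict.mk u).get? "risk_level" == some "high") : Nat)
          - (l.countP (fun u => (PySem.Dict.mk u).get? "risk_level" == some "medium") : Nat)))] := by
  induction l generalizing a b c with
  | nil => simp
  | cons u t ih =>
    simp only [List.foldl_cons, List.countP_cons, List.length_cons]
    by_cases h1 : (PySem.Dict.mk u).get? "risk_level" = some "high"
    · rw [if_pos h1, pv_mod_high, ih]
      simp [h1]
      omega
    · by_cases h2 : (PySem.Dict.mk u).get? "risk_level" = some "medium"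
      · rw [if_neg h1, if_pos h2, pv_mod_medium, ih]
        simp [h2]
        omega
      · rw [if_neg h1, if_neg h2, pv_mod_low, ih]
        simp [h1, h2]
        omega

-- ===== VERDICT (by name: the statement is the Claim_ definition above) =====
theorem get_risk_summary_spec : Claim_equal_get_risk_summary := by
  intro risk_data _
  unfold Spec_get_risk_summary get_risk_summary get_risk_summary_alt
  rw [get_risk_summary_loop]
  simp
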